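-- pv_equiv track=rewrite | github.com/waynegault/ancestry | gedcom_utils.py | _is_ancestor_at_generation
-- ===== SOURCE A (Python) =====
-- def _is_ancestor_at_generation(
--     descendant_id: str,
--     ancestor_id: str,
--     generations: int,
--     id_to_parents: dict[str, set[str]]
-- ) -> bool:
--     """
--     Check if ancestor_id is an ancestor of descendant_id at a specific generation level.
--
--     Args:
--         descendant_id: ID of the descendant
--         ancestor_id: ID of the potential ancestor
--         generations: Number of generations up (1=parent, 2=grandparent, 3=great-grandparent, etc.)
--         id_to_parents: Dictionary mapping individual IDs to their parent IDs
--
--     Returns: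
--         True if ancestor_id is an ancestor at the specified generation level
--     """
--     if generations < 1:
--         return False
--
--     # Start with the descendant
--     current_generation = {descendant_id}
--
--     # Walk up the specified number of generations
--     for _ in range(generations):
--         next_generation = set()
--         for person_id in current_generation:
--             parents = id_to_parents.get(person_id, set())
--             next_generation.update(parents)
--
--         if not next_generation:
--             return False  # No more ancestors at this level
--
--         current_generation = next_generation
--
--     # Check if ancestor_id is in the final generation
--     return ancestor_id in current_generation
-- ===== SOURCE B (Python) =====
-- def _is_ancestor_at_generation(
--     descendant_id: str,
--     ancestor_id: str,
--     generations: int,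
--     id_to_parents: dict[str, set[str]]
-- ) -> bool:
--     """Exact-generation ancestor test via frontier iteration with cycle detection.
--
--     The sequence of generation frontiers is a deterministic iteration of one
--     step function over finitely many sets, so it is eventually periodic.  We
--     remember the frontiers already produced; as soon as one repeats we reduce
--     the remaining number of generations modulo the cycle length.
--     """
--     if generations < 1:
--         return False
--
--     seen = []              # frontiers produced so far, oldest first
--     cur = {descendant_id}
--     remaining = generations
--     while remaining > 0:
--         hit = False
--         for k, f in enumerate(seen):
--             if f == cur:   # frontier repeats: cycle of length len(seen) - k
--                 remaining %= len(seen) - k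
--                 seen = []  # at most that many further steps are now needed
--                 hit = True
--                 break
--         if not hit:
--             seen.append(cur)
--         if remaining == 0:
--             break
--         nxt = {p for person in cur for p in id_to_parents.get(person, set())}
--         if not nxt:
--             return False   # no ancestors at all at this level
--         cur = nxt
--         remaining -= 1
--     return ancestor_id in cur
-- ===== Notes on version B (the rewrite author's own statement) =====
-- stated objective: alternative
-- what changed: B replaces A's one-step-per-generation frontier walk by frontier iteration with cycle detection: it remembers the frontiers already produced and, as soon as one repeats, reduces the remaining generation count modulo the cycle length, bounding the loop by the frontier sequence's preperiod plus period instead of by `generations`.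
import Mathlib
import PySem

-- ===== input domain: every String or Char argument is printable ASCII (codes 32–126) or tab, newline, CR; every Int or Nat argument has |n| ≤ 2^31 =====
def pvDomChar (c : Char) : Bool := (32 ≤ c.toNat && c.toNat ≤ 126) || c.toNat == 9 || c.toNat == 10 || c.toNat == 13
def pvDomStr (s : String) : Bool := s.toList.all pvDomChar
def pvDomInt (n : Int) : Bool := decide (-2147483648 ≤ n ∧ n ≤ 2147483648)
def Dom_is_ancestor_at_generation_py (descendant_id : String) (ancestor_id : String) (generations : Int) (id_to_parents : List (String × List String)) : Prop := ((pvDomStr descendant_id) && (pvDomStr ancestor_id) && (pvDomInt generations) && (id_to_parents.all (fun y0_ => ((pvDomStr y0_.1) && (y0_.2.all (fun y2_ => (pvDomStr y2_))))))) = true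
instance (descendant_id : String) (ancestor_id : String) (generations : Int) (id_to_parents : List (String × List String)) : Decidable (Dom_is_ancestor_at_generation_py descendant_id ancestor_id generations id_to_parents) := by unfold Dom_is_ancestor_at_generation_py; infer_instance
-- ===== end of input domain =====

-- B replaces A's one-step-per-generation frontier walk by frontier iteration with cycle
-- detection: the frontier sequence is eventually periodic, so B reduces the remaining
-- generation count modulo the detected period and stops early (objective: alternative).

-- ===== PORT A =====
-- next_generation = set(); for person in current: next_generation.update(id_to_parents.get(person, set()))
def pvStepA (m : List (String × List String)) (cur : PySem.Set String) : PySem.Set String :=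
  cur.foldl (fun acc person => PySem.Set.update acc ((PySem.Dict.mk m).getD person [])) []

-- `for _ in range(generations)` with the early `return False` on an empty frontier,
-- then `return ancestor_id in current_generation`
def pvLoopA (m : List (String × List String)) (anc : String) : Nat → PySem.Set String → Bool
  | 0, cur => PySem.Set.contains cur anc
  | k + 1, cur =>
      let next := pvStepA m cur
      if next.isEmpty then false else pvLoopA m anc k next

def is_ancestor_at_generation_py (descendant_id : String) (ancestor_id : String) (generations : Int) (id_to_parents : List (String × List String)) : Bool :=
  if generations < 1 then false
  else pvLoopA id_to_parents ancestor_id generations.toNat (PySem.Set.ofList [descendant_id])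

-- ===== PORT B =====
-- nxt = {p for person in cur for p in id_to_parents.get(person, set())}
def pvStepB (m : List (String × List String)) (cur : PySem.Set String) : PySem.Set String :=
  PySem.Set.ofList (cur.flatMap (fun person => (PySem.Dict.mk m).getD person []))

-- the `while remaining > 0` loop of Source B: scan `seen` for a repeated frontier, on a hit
-- reduce `remaining` modulo the cycle length and clear `seen`, otherwise append `cur`;
-- then step the frontier once (early False when it empties)
def pvLoopB (m : List (String × List String)) (anc : String) :
    Nat → List (PySem.Set String) → PySem.Set String → Bool
  | 0, _, cur => PySem.Set.contains cur anc
  | r + 1, seen, cur =>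
      match seen.findIdx? (fun f => PySem.Set.equal f cur) with
      | some k =>
          let r' := (r + 1) % (seen.length - k)
          if h : r' = 0 then PySem.Set.contains cur anc
          else
            let nxt := pvStepB m cur
            if nxt.isEmpty then false else pvLoopB m anc (r' - 1) [] nxt
      | none =>
          let nxt := pvStepB m cur
          if nxt.isEmpty then false else pvLoopB m anc r (seen ++ [cur]) nxt
  termination_by r _ _ => r
  decreasing_by
  · have h1 : r' ≤ r + 1 := Nat.mod_le (r + 1) (seen.length - k)
    omega
  · omega

def is_ancestor_at_generation_py_alt (descendant_id : String) (ancestor_id : String) (generations : Int) (id_to_parents : List (String × List String)) : Bool :=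
  if generations < 1 then false
  else pvLoopB id_to_parents ancestor_id generations.toNat [] (PySem.Set.ofList [descendant_id])

-- ===== PRECONDITION & SPEC =====
def Spec_is_ancestor_at_generation_py (descendant_id : String) (ancestor_id : String) (generations : Int) (id_to_parents : List (String × List String)) (out : Bool) : Prop := out = is_ancestor_at_generation_py_alt descendant_id ancestor_id generations id_to_parents
instance (descendant_id : String) (ancestor_id : String) (generations : Int) (id_to_parents : List (String × List String)) (out : Bool) : Decidable (Spec_is_ancestor_at_generation_py descendant_id ancestor_id generations id_to_parents out) := by unfold Spec_is_ancestor_at_generation_py; infer_instance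

-- ===== CLAIM (what is proved, stated in full; the proofs are below) =====
def Claim_equal_is_ancestor_at_generation_py : Prop := ∀ (descendant_id : String) (ancestor_id : String) (generations : Int) (id_to_parents : List (String × List String)), Dom_is_ancestor_at_generation_py descendant_id ancestor_id generations id_to_parents → Spec_is_ancestor_at_generation_py descendant_id ancestor_id generations id_to_parents (is_ancestor_at_generation_py descendant_id ancestor_id generations id_to_parents)

-- ===== LEMMAS AND PROOFS =====

-- same-members relation on frontiers (Python set equality)
def pvSE (s t : PySem.Set String) : Prop := ∀ x, x ∈ s ↔ x ∈ t

-- pure iteration of A's step (no early exit); the early exit is absorbed since pvStepA [] = []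
def pvIter (m : List (String × List String)) : Nat → PySem.Set String → PySem.Set String
  | 0, s => s
  | k + 1, s => pvIter m k (pvStepA m s)

def pvIterB (m : List (String × List String)) : Nat → PySem.Set String → PySem.Set String
  | 0, s => s
  | k + 1, s => pvIterB m k (pvStepB m s)

theorem pv_mem_stepA (m : List (String × List String)) (cur : PySem.Set String) (x : String) :
    x ∈ pvStepA m cur ↔ ∃ c ∈ cur, x ∈ (PySem.Dict.mk m).getD c [] := by
  unfold pvStepA
  have h : ∀ (l : List String) (acc : PySem.Set String),
      x ∈ l.foldl (fun acc person => PySem.Set.update acc ((PySem.Dict.mk m).getD person [])) acc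
        ↔ x ∈ acc ∨ ∃ c ∈ l, x ∈ (PySem.Dict.mk m).getD c [] := by
    intro l
    induction l with
    | nil => simp
    | cons a l ih =>
      intro acc
      simp only [List.foldl_cons, ih, PySem.Set.mem_update, List.mem_cons]
      constructor
      · rintro ((h | h) | ⟨c, hc, hx⟩)
        · exact Or.inl h
        · exact Or.inr ⟨a, Or.inl rfl, h⟩
        · exact Or.inr ⟨c, Or.inr hc, hx⟩
      · rintro (h | ⟨c, (rfl | hc), hx⟩)
        · exact Or.inl (Or.inl h)
        · exact Or.inl (Or.inr hx)
        · exact Or.inr ⟨c, hc, hx⟩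
  simpa using h cur []

theorem pv_mem_stepB (m : List (String × List String)) (cur : PySem.Set String) (x : String) :
    x ∈ pvStepB m cur ↔ ∃ c ∈ cur, x ∈ (PySem.Dict.mk m).getD c [] := by
  unfold pvStepB
  simp [PySem.Set.mem_ofList, List.mem_flatMap]

theorem pv_SE_stepBA (m : List (String × List String)) (s : PySem.Set String) :
    pvSE (pvStepB m s) (pvStepA m s) := by
  intro x; rw [pv_mem_stepB, pv_mem_stepA]

theorem pv_SE_stepA_congr (m : List (String × List String)) {s t : PySem.Set String}
    (h : pvSE s t) : pvSE (pvStepA m s) (pvStepA m t) := by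
  intro x
  rw [pv_mem_stepA, pv_mem_stepA]
  constructor
  · rintro ⟨c, hc, hx⟩; exact ⟨c, (h c).mp hc, hx⟩
  · rintro ⟨c, hc, hx⟩; exact ⟨c, (h c).mpr hc, hx⟩

theorem pv_SE_iter_congr (m : List (String × List String)) (k : Nat) {s t : PySem.Set String}
    (h : pvSE s t) : pvSE (pvIter m k s) (pvIter m k t) := by
  induction k generalizing s t with
  | zero => exact h
  | succ k ih => exact ih (pv_SE_stepA_congr m h)

theorem pv_SE_iterB (m : List (String × List String)) (k : Nat) (s : PySem.Set String) :
    pvSE (pvIterB m k s) (pvIter m k s) := by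
  induction k generalizing s with
  | zero => intro x; rfl
  | succ k ih =>
    show pvSE (pvIterB m k (pvStepB m s)) (pvIter m k (pvStepA m s))
    intro x
    exact ((ih (pvStepB m s)) x).trans ((pv_SE_iter_congr m k (pv_SE_stepBA m s)) x)

theorem pv_eq_nil_of_SE_nil {s : PySem.Set String} (h : ∀ x, x ∉ s) : s = [] :=
  List.eq_nil_iff_forall_not_mem.mpr h

theorem pv_stepA_nil (m : List (String × List String)) : pvStepA m [] = [] := rfl

theorem pv_iter_nil (m : List (String × List String)) (k : Nat) : pvIter m k [] = [] := by
  induction k with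
  | zero => rfl
  | succ k ih => show pvIter m k (pvStepA m []) = []; rw [pv_stepA_nil]; exact ih

theorem pv_iter_add (m : List (String × List String)) (a b : Nat) (s : PySem.Set String) :
    pvIter m (a + b) s = pvIter m b (pvIter m a s) := by
  induction a generalizing s with
  | zero => simp [pvIter]
  | succ a ih =>
    have e : a + 1 + b = (a + b) + 1 := by omega
    rw [e]
    show pvIter m (a + b) (pvStepA m s) = _
    rw [ih (pvStepA m s)]
    rfl

theorem pv_loopA_eq_iter (m : List (String × List String)) (anc : String) (r : Nat)
    (s : PySem.Set String) :
    pvLoopA m anc r s = PySem.Set.contains (pvIter m r s) anc := by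
  induction r generalizing s with
  | zero => rfl
  | succ r ih =>
    show (if (pvStepA m s).isEmpty then false else pvLoopA m anc r (pvStepA m s)) = _
    by_cases h : (pvStepA m s).isEmpty
    · rw [if_pos h]
      have hnil : pvStepA m s = [] := List.isEmpty_iff.mp h
      show false = PySem.Set.contains (pvIter m r (pvStepA m s)) anc
      rw [hnil, pv_iter_nil]
      rfl
    · rw [if_neg h]
      exact ih (pvStepA m s)

theorem pv_contains_SE {s t : PySem.Set String} (h : pvSE s t) (a : String) :
    PySem.Set.contains s a = PySem.Set.contains t a := by
  by_cases hm : a ∈ s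
  · rw [(PySem.Set.contains_iff s a).mpr hm, (PySem.Set.contains_iff t a).mpr ((h a).mp hm)]
  · have hm' : a ∉ t := fun hc => hm ((h a).mpr hc)
    rw [Bool.eq_iff_iff]
    constructor
    · intro hc; exact absurd ((PySem.Set.contains_iff s a).mp hc) hm
    · intro hc; exact absurd ((PySem.Set.contains_iff t a).mp hc) hm'

-- periodicity: if stepping p times returns a set with the same members, the remaining
-- count may be reduced modulo p
theorem pv_iter_mod (m : List (String × List String)) {p : Nat} (hp : 0 < p)
    {s : PySem.Set String} (hper : pvSE (pvIter m p s) s) (r : Nat) :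
    pvSE (pvIter m r s) (pvIter m (r % p) s) := by
  induction r using Nat.strong_induction_on with
  | _ r ih =>
    by_cases h : r < p
    · rw [Nat.mod_eq_of_lt h]; intro x; rfl
    · have e : p + (r - p) = r := by omega
      have h1 : pvSE (pvIter m r s) (pvIter m (r - p) s) := by
        have hadd := pv_iter_add m p (r - p) s
        rw [e] at hadd
        rw [hadd]
        exact pv_SE_iter_congr m (r - p) hper
      have h2 := ih (r - p) (by omega)
      have h3 : (r - p) % p = r % p := by
        conv_rhs => rw [← e]
        rw [Nat.add_mod_left]
      intro x
      rw [h1 x, h2 x, h3]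

-- the `seen` history is the literal chain of predecessor frontiers under pvStepB
def pvChain (m : List (String × List String)) (l : List (PySem.Set String)) : Prop :=
  List.IsChain (fun a b => b = pvStepB m a) l

theorem pv_chain_get (m : List (String × List String)) {l : List (PySem.Set String)}
    (hc : pvChain m l) (t : Nat) :
    ∀ (j i : Nat) (hj : j < l.length) (hi : i < l.length), j = i + t →
      l[j]'hj = pvIterB m t (l[i]'hi) := by
  induction t with
  | zero =>
    intro j i hj hi he
    have : j = i := by omega
    subst this
    rfl
  | succ t ih =>
    intro j i hj hi he
    have hi1 : i + 1 < l.length := by omega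
    have hstep : l[i + 1]'hi1 = pvStepB m (l[i]'hi) := by
      exact List.isChain_iff_getElem.mp hc i hi1
    have := ih j (i + 1) hj hi1 (by omega)
    rw [this, hstep]
    rfl

-- main invariant lemma for B's loop: under the chain invariant it computes membership
-- of the ancestor in the frontier after exactly r more steps
theorem pv_loopB_eq_iter (m : List (String × List String)) (anc : String) (r : Nat)
    (seen : List (PySem.Set String)) (cur : PySem.Set String)
    (hc : pvChain m (seen ++ [cur])) :
    pvLoopB m anc r seen cur = PySem.Set.contains (pvIter m r cur) anc := by
  induction r using Nat.strong_induction_on generalizing seen cur with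
  | _ r ih =>
    rcases r with _ | r
    · simp only [pvLoopB, pvIter]
    · rw [pvLoopB]
      cases hfind : seen.findIdx? (fun f => PySem.Set.equal f cur) with
      | none =>
        dsimp only
        have hc' : pvChain m ((seen ++ [cur]) ++ [pvStepB m cur]) := by
          refine List.IsChain.append hc (List.isChain_singleton _) ?_
          intro x hx y hy
          rw [List.getLast?_concat] at hx
          simp only [Option.mem_def, Option.some.injEq] at hx
          simp only [List.head?_cons, Option.mem_def, Option.some.injEq] at hy
          subst hx; subst hy
          rfl
        by_cases hemp : (pvStepB m cur).isEmpty
        · rw [if_pos hemp]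
          have hnilB : pvStepB m cur = [] := List.isEmpty_iff.mp hemp
          have hnilA : pvStepA m cur = [] := by
            apply pv_eq_nil_of_SE_nil
            intro x hx
            have hmem := ((pv_SE_stepBA m cur) x).mpr hx
            rw [hnilB] at hmem
            simp at hmem
          show false = PySem.Set.contains (pvIter m r (pvStepA m cur)) anc
          rw [hnilA, pv_iter_nil]
          rfl
        · rw [if_neg hemp]
          have hrec := ih r (by omega) (seen ++ [cur]) (pvStepB m cur)
            (by simpa using hc')
          rw [hrec]
          show _ = PySem.Set.contains (pvIter m r (pvStepA m cur)) anc
          exact pv_contains_SE (pv_SE_iter_congr m r (pv_SE_stepBA m cur)) anc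
      | some k =>
        dsimp only
        obtain ⟨hklt, hidx⟩ := List.findIdx?_eq_some_iff_findIdx_eq.mp hfind
        have hkeq : PySem.Set.equal (seen[k]'hklt) cur = true := by
          have h2 := @List.findIdx_getElem _ (fun f => PySem.Set.equal f cur) seen
            (by rw [hidx]; exact hklt)
          simp only [hidx] at h2
          exact h2
        set p := seen.length - k with hp
        have hppos : 0 < p := by omega
        have hcur : cur = pvIterB m p (seen[k]'hklt) := by
          have hj : seen.length < (seen ++ [cur]).length := by simp
          have hi : k < (seen ++ [cur]).length := by simp; omega
          have hchain := pv_chain_get m hc p seen.length k hj hi (by omega)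
          have hL : (seen ++ [cur])[seen.length]'hj = cur := List.getElem_concat_length rfl hj
          have hR : (seen ++ [cur])[k]'hi = seen[k]'hklt := List.getElem_append_left hklt
          rw [hL, hR] at hchain
          exact hchain
        have hSEk : pvSE (seen[k]'hklt) cur := fun x => (PySem.Set.equal_iff _ _).mp hkeq x
        have hper : pvSE (pvIter m p cur) cur := by
          intro x
          have h1 : pvSE (pvIter m p cur) (pvIter m p (seen[k]'hklt)) :=
            pv_SE_iter_congr m p (fun y => (hSEk y).symm)
          have h2 : pvSE (pvIterB m p (seen[k]'hklt)) (pvIter m p (seen[k]'hklt)) :=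
            pv_SE_iterB m p _
          rw [h1 x, ← h2 x, ← hcur]
        have hmod := pv_iter_mod m hppos hper (r + 1)
        by_cases hz : (r + 1) % p = 0
        · rw [dif_pos hz]
          have hcc : PySem.Set.contains (pvIter m (r + 1) cur) anc
              = PySem.Set.contains (pvIter m ((r + 1) % p) cur) anc :=
            pv_contains_SE hmod anc
          rw [hcc, hz]
          rfl
        · rw [dif_neg hz]
          have hr'pos : 0 < (r + 1) % p := Nat.pos_of_ne_zero hz
          have hr'le : (r + 1) % p ≤ r + 1 := Nat.mod_le _ _
          by_cases hemp : (pvStepB m cur).isEmpty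
          · rw [if_pos hemp]
            have hnilB : pvStepB m cur = [] := List.isEmpty_iff.mp hemp
            have hnilA : pvStepA m cur = [] := by
              apply pv_eq_nil_of_SE_nil
              intro x hx
              have hmem := ((pv_SE_stepBA m cur) x).mpr hx
              rw [hnilB] at hmem
              simp at hmem
            rw [pv_contains_SE hmod anc]
            have hpeel : pvIter m ((r + 1) % p) cur
                = pvIter m ((r + 1) % p - 1) (pvStepA m cur) := by
              conv_lhs => rw [show (r + 1) % p = ((r + 1) % p - 1) + 1 by omega]
              rfl
            rw [hpeel, hnilA, pv_iter_nil]
            rfl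
          · rw [if_neg hemp]
            have hrec := ih ((r + 1) % p - 1) (by omega) [] (pvStepB m cur)
              (by simp [pvChain])
            rw [hrec]
            rw [pv_contains_SE hmod anc]
            have hpeel : pvIter m ((r + 1) % p) cur
                = pvIter m ((r + 1) % p - 1) (pvStepA m cur) := by
              conv_lhs => rw [show (r + 1) % p = ((r + 1) % p - 1) + 1 by omega]
              rfl
            rw [hpeel]
            exact pv_contains_SE (pv_SE_iter_congr m ((r + 1) % p - 1) (pv_SE_stepBA m cur)) anc

-- ===== VERDICT (by name: the statement is the Claim_ definition above) =====
theorem is_ancestor_at_generation_py_spec : Claim_equal_is_ancestor_at_generation_py := by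
  intro d a g m _
  show is_ancestor_at_generation_py d a g m = is_ancestor_at_generation_py_alt d a g m
  unfold is_ancestor_at_generation_py is_ancestor_at_generation_py_alt
  by_cases hg : g < 1
  · rw [if_pos hg, if_pos hg]
  · rw [if_neg hg, if_neg hg]
    rw [pv_loopA_eq_iter,
      pv_loopB_eq_iter m a g.toNat [] _ (by simp [pvChain])]
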